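-- pv_equiv track=rewrite | github.com/theXYZT/codejam-2018 | Qualification Round/saving-the-universe-again.py | calculate_damage
-- ===== SOURCE A (Python) =====
-- def calculate_damage(program):
--     """Calculate the damage done by program."""
--     strength = 1
--     damage = 0
--     for instruction in program:
--         if instruction == 'C':
--             strength *= 2
--         else:
--             damage += strength
--     return damage
-- ===== SOURCE B (Python) =====
-- def calculate_damage(program):
--     """Calculate the damage done by program."""
--     damage = 0
--     for instruction in reversed(program):
--         if instruction == 'C':
--             damage *= 2
--         else:
--             damage += 1
--     return damage
-- ===== Notes on version B (the rewrite author's own statement) =====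
-- stated objective: simpler
-- what changed: Single accumulator over the reversed string: each 'C' doubles the damage accumulated to its right, replacing A's two-variable (strength, damage) forward pass.
import Mathlib
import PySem

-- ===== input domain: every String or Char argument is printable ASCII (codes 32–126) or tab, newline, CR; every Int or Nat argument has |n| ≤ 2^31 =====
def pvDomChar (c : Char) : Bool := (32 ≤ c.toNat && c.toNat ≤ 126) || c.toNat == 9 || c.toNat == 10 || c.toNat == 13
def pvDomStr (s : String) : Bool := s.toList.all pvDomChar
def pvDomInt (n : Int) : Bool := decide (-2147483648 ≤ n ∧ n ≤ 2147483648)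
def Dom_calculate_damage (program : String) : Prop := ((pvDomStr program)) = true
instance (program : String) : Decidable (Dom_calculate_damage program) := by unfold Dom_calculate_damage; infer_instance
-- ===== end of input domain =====

-- B replaces A's two-variable (strength, damage) forward pass by a single-accumulator
-- reverse pass: each 'C' doubles the damage accumulated to its right (objective: simpler).

-- ===== PORT A =====
def calculate_damage (program : String) : Int :=
  (program.toList.foldl
    (fun (st : Int × Int) instruction =>
      if instruction = 'C' then (st.1 * 2, st.2) else (st.1, st.2 + st.1))
    (1, 0)).2

-- ===== PORT B =====
def calculate_damage_alt (program : String) : Int :=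
  program.toList.reverse.foldl
    (fun (damage : Int) instruction =>
      if instruction = 'C' then damage * 2 else damage + 1)
    0

-- ===== PRECONDITION & SPEC =====
def Spec_calculate_damage (program : String) (out : Int) : Prop := out = calculate_damage_alt program
instance (program : String) (out : Int) : Decidable (Spec_calculate_damage program out) := by unfold Spec_calculate_damage; infer_instance

-- ===== CLAIM (what is proved, stated in full; the proofs are below) =====
def Claim_equal_calculate_damage : Prop := ∀ (program : String), Dom_calculate_damage program → Spec_calculate_damage program (calculate_damage program)

-- ===== LEMMAS AND PROOFS =====

-- B's reverse foldl is a foldr over the original list.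
theorem alt_eq_foldr (l : List Char) :
    l.reverse.foldl (fun (damage : Int) instruction =>
      if instruction = 'C' then damage * 2 else damage + 1) 0
    = l.foldr (fun instruction (damage : Int) =>
      if instruction = 'C' then damage * 2 else damage + 1) 0 := by
  rw [List.foldl_reverse]

-- A's fold from an arbitrary state, expressed via B's foldr.
theorem foldA_eq (l : List Char) (s d : Int) :
    (l.foldl (fun (st : Int × Int) instruction =>
        if instruction = 'C' then (st.1 * 2, st.2) else (st.1, st.2 + st.1)) (s, d)).2
    = d + s * l.foldr (fun instruction (damage : Int) =>
        if instruction = 'C' then damage * 2 else damage + 1) 0 := by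
  induction l generalizing s d with
  | nil => simp
  | cons c t ih =>
    simp only [List.foldl_cons, List.foldr_cons]
    by_cases hc : c = 'C' <;> simp [hc, ih] <;> ring

-- ===== VERDICT (by name: the statement is the Claim_ definition above) =====
theorem calculate_damage_spec : Claim_equal_calculate_damage := by
  intro program _
  unfold Spec_calculate_damage calculate_damage calculate_damage_alt
  rw [alt_eq_foldr, foldA_eq]
  ring
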